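-- pv_equiv track=rewrite | github.com/ThejanB/Project-Euler | 146.py | solve_one
-- ===== SOURCE A (Python) =====
-- from math import prod
--
-- def is_probable_prime(n: int) -> bool:
--     if n < 2:
--         return False
--
--     small_primes = (2, 3, 5, 7, 11, 13, 17, 19, 23, 29, 31, 37, 41, 43, 47, 53, 59, 61, 67, 71, 73, 79, 83, 89, 97)
--     for p in small_primes:
--         if n % p == 0:
--             return n == p
--     # write n-1 = d * 2^s
--     d = n - 1
--     s = (d & -d).bit_length() - 1  # number of trailing zeros
--     d >>= s
--
--     def check(a: int) -> bool:
--         x = pow(a, d, n)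
--         if x == 1 or x == n - 1:
--             return True
--         for _ in range(s - 1):
--             x = (x * x) % n
--             if x == n - 1:
--                 return True
--         return False
--
--     # Deterministic set for 64-bit
--     for a in (2, 3, 5, 7, 11, 13, 17):
--         if a % n == 0:
--             return True
--         if not check(a):
--             return False
--     return True
--
-- WHEEL_PRIMES = (2, 3, 5, 7, 11, 13)
--
-- WHEEL_MOD = prod(WHEEL_PRIMES)
--
-- def admissible_residues(offsets):
--
--     A = list(offsets)
--     good = []
--     for r in range(WHEEL_MOD):
--         ok = True
--         for p in WHEEL_PRIMES:
--             rp2 = (r * r) % p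
--             for a in A:
--                 if (rp2 + a) % p == 0:
--                     ok = False
--                     break
--             if not ok:
--                 break
--         if ok:
--             good.append(r)
--     return good
--
-- def solve_one(L, offsets):
--     a = sorted(offsets)
--     # build list of positions inside [a1, a6] that must be composite
--     a_set = set(a)
--     gap_check = [b for b in range(a[0], a[-1] + 1) if b not in a_set]
--
--     residues = admissible_residues(a)
--     total = 0
--     for r in residues:
--         # iterate n === r (mod WHEEL_MOD)
--         n = r
--         if n == 0:
--             n += WHEEL_MOD
--         while n < L:
--             s = n * n
--             # primality of the six key positions
--             good = True
--             for ai in a: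
--                 if not is_probable_prime(s + ai):
--                     good = False
--                     break
--             if good:
--                 # ensure consecutiveness: every in-between value is composite
--                 for b in gap_check:
--                     if is_probable_prime(s + b):
--                         good = False
--                         break
--                 if good:
--                     total += n
--             n += WHEEL_MOD
--     return total
-- ===== SOURCE B (Python) =====
-- def is_probable_prime(n: int) -> bool:
--     if n < 2:
--         return False
--
--     small_primes = (2, 3, 5, 7, 11, 13, 17, 19, 23, 29, 31, 37, 41, 43, 47, 53, 59, 61, 67, 71, 73, 79, 83, 89, 97)
--     for p in small_primes:
--         if n % p == 0:
--             return n == p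
--     # write n-1 = d * 2^s
--     d = n - 1
--     s = (d & -d).bit_length() - 1  # number of trailing zeros
--     d >>= s
--
--     def check(a: int) -> bool:
--         x = pow(a, d, n)
--         if x == 1 or x == n - 1:
--             return True
--         for _ in range(s - 1):
--             x = (x * x) % n
--             if x == n - 1:
--                 return True
--         return False
--
--     # Deterministic set for 64-bit
--     for a in (2, 3, 5, 7, 11, 13, 17):
--         if a % n == 0:
--             return True
--         if not check(a):
--             return False
--     return True
--
-- WHEEL_PRIMES = (2, 3, 5, 7, 11, 13)
--
-- def solve_one(L, offsets):
--     a = sorted(offsets)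
--     lo, hi = a[0], a[-1]
--     key = set(a)
--     # admissible residues built by CRT lifting, one wheel prime at a time,
--     # instead of scanning all 30030 residues against every prime
--     residues, m = [0], 1
--     for p in WHEEL_PRIMES:
--         residues = [k * m + r for k in range(p) for r in residues
--                     if all(((k * m + r) * (k * m + r) % p + a_) % p != 0 for a_ in a)]
--         m *= p
--     total = 0
--     # single block-by-block walk of the wheel; one merged verification pass
--     # requiring primality exactly at the key offsets of the whole window
--     for base in range(0, L, m):
--         for r in residues:
--             n = base + r
--             if 0 < n < L and all(is_probable_prime(n * n + b) == (b in key) for b in range(lo, hi + 1)):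
--                 total += n
--     return total
-- ===== Notes on version B (the rewrite author's own statement) =====
-- stated objective: alternative
-- what changed: B constructs the admissible residues by CRT lifting prime by prime (residues mod m extended to mod m*p and filtered per prime, so each prime is only tested against the residues that survive the smaller primes) instead of A's scan of all 30030 residues against every wheel prime, and replaces A's per-residue 'while n < L' loops with separate key-offset and gap-composite phases by one block-by-block walk of the wheel with a single merged verification pass requiring primality exactly at the key offsets of the window.
import Mathlib
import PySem

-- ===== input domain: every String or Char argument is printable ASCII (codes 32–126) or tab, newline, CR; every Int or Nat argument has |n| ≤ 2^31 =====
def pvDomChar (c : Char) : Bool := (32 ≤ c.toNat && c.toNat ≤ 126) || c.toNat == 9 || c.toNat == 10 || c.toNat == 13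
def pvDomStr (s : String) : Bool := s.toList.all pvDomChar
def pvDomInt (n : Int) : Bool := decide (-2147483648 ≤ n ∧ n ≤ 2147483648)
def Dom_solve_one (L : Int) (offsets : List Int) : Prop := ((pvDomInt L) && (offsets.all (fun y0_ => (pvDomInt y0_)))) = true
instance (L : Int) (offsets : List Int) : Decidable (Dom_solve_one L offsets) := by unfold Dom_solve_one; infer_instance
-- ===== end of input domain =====

-- B (solve_one_alt) builds the admissible residues by CRT lifting prime by prime (instead of A's
-- scan of all 30030 residues against every wheel prime) and walks the wheel block by block with a
-- single merged verification pass over the offset window, instead of A's per-residue while-loops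
-- with separate key/gap phases; same exact result by a different algorithm.

-- ===== PORT A =====

-- shared helper (identical in Source A and Source B): is_probable_prime
def smallPrimes : List Int :=
  [2, 3, 5, 7, 11, 13, 17, 19, 23, 29, 31, 37, 41, 43, 47, 53, 59, 61, 67, 71, 73, 79, 83, 89, 97]

-- 'for p in small_primes: if n % p == 0: return n == p' (falls through with none)
def smallPrimeScan (n : Int) : List Int → Option Bool
  | [] => none
  | p :: ps => if PySem.Int.mod n p == 0 then some (n == p) else smallPrimeScan n ps

-- the 'for _ in range(s-1)' squaring loop inside check
def ippSquareLoop (n : Int) : Int → Nat → Bool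
  | _, 0 => false
  | x, k + 1 =>
    let x' := PySem.Int.mod (x * x) n
    if x' == n - 1 then true else ippSquareLoop n x' k

-- the inner 'check(a)' of is_probable_prime; d ≥ 0 at every call, so pow(a, d, n) = powMod a d.toNat n
def ippCheck (n d : Int) (s : Nat) (a : Int) : Bool :=
  let x := PySem.Int.powMod a d.toNat n
  if x == 1 || x == n - 1 then true else ippSquareLoop n x (s - 1)

-- 'for a in (2, 3, 5, 7, 11, 13, 17): …'
def mrWitnessLoop (n d : Int) (s : Nat) : List Int → Bool
  | [] => true
  | a :: as =>
    if PySem.Int.mod a n == 0 then true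
    else if !(ippCheck n d s a) then false
    else mrWitnessLoop n d s as

def is_probable_prime (n : Int) : Bool :=
  if n < 2 then false
  else
    match smallPrimeScan n smallPrimes with
    | some b => b
    | none =>
      let d0 := n - 1
      -- s = (d & -d).bit_length() - 1 ; d >>= s
      let s := PySem.Int.bitLength (PySem.Int.band d0 (-d0)) - 1
      let d := d0 >>> s
      mrWitnessLoop n d s [2, 3, 5, 7, 11, 13, 17]

-- shared constant (module level in Source A and Source B): the wheel primes
def WHEEL_PRIMES : List Int := [2, 3, 5, 7, 11, 13]

def WHEEL_MOD : Int := WHEEL_PRIMES.prod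

-- A's helper: admissible_residues scans every residue r in range(WHEEL_MOD)
def admissible_residues (offsets : List Int) : List Int :=
  (PySem.List.pyRange 0 WHEEL_MOD 1).filter (fun r =>
    WHEEL_PRIMES.all (fun p =>
      offsets.all (fun a => !(PySem.Int.mod (PySem.Int.mod (r * r) p + a) p == 0))))

-- A's two-phase verification: all key positions prime, then every gap position composite
def keyGapGood (a gap : List Int) (s : Int) : Bool :=
  a.all (fun ai => is_probable_prime (s + ai)) && gap.all (fun b => !is_probable_prime (s + b))

-- A's 'while n < L: … n += WHEEL_MOD' accumulation for one residue class
def loopA (L : Int) (a gap : List Int) (n : Int) : Int :=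
  if _h : n < L then
    (if keyGapGood a gap (n * n) then n else 0) + loopA L a gap (n + WHEEL_MOD)
  else 0
termination_by (L - n).toNat
decreasing_by
  have hw : (30030 : Int) = WHEEL_MOD := by decide
  rw [← hw]; omega

def solve_one (L : Int) (offsets : List Int) : Int :=
  match PySem.List.sorted offsets (fun x => x) false with
  | [] => 0   -- Python raises IndexError at a[0] here; excluded by Pre_solve_one
  | a0 :: rest =>
    let a := a0 :: rest
    let aset : PySem.Set Int := PySem.Set.ofList a
    let last := PySem.List.pyGetD a (-1) 0
    let gap_check := (PySem.List.pyRange a0 (last + 1) 1).filter (fun b => !(aset.contains b))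
    let residues := admissible_residues a
    residues.foldl
      (fun total r => total + loopA L a gap_check (if r == 0 then r + WHEEL_MOD else r)) 0

-- ===== PORT B =====

-- B's per-prime admissibility test (the 'all(... for a_ in a)' of the comprehension)
def condOne (offsets : List Int) (p r : Int) : Bool :=
  offsets.all (fun a => !(PySem.Int.mod (PySem.Int.mod (r * r) p + a) p == 0))

-- one CRT-lift step: residues mod m → residues mod m*p
-- '[k * m + r for k in range(p) for r in residues if all(...)]', state (residues, m)
def liftStep (offsets : List Int) (st : List Int × Int) (p : Int) : List Int × Int :=
  ((PySem.List.pyRange 0 p 1).flatMap (fun k =>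
      (st.1.filter (fun r => condOne offsets p (k * st.2 + r))).map (fun r => k * st.2 + r)),
   st.2 * p)

-- B's single merged verification pass: prime exactly at the key offsets of the window
def windowGood (lo hi : Int) (key : PySem.Set Int) (s : Int) : Bool :=
  (PySem.List.pyRange lo (hi + 1) 1).all (fun b => is_probable_prime (s + b) == key.contains b)

def solve_one_alt (L : Int) (offsets : List Int) : Int :=
  match PySem.List.sorted offsets (fun x => x) false with
  | [] => 0   -- Python raises IndexError at a[0] here; excluded by Pre_solve_one
  | lo :: rest =>
    let a := lo :: rest
    let hi := PySem.List.pyGetD a (-1) 0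
    let key : PySem.Set Int := PySem.Set.ofList a
    let rm := WHEEL_PRIMES.foldl (liftStep a) ([0], 1)
    (PySem.List.pyRange 0 L rm.2).foldl
      (fun total base =>
        rm.1.foldl
          (fun total r =>
            let n := base + r
            if decide (0 < n) && decide (n < L) then
              (if windowGood lo hi key (n * n) then total + n else total)
            else total)
          total)
      0

-- ===== PRECONDITION & SPEC =====
-- Pre_ excludes only the empty offsets list, on which Python A raises IndexError at a[0].
def Pre_solve_one (L : Int) (offsets : List Int) : Prop := offsets ≠ []
instance (L : Int) (offsets : List Int) : Decidable (Pre_solve_one L offsets) := by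
  unfold Pre_solve_one; infer_instance

def pvWitness_solve_one : Int × List Int := (100, [1, 3])

def Spec_solve_one (L : Int) (offsets : List Int) (out : Int) : Prop := out = solve_one_alt L offsets
instance (L : Int) (offsets : List Int) (out : Int) : Decidable (Spec_solve_one L offsets out) := by
  unfold Spec_solve_one; infer_instance

-- ===== CLAIM (what is proved, stated in full; the proofs are below) =====
def Claim_equal_solve_one : Prop := ∀ (L : Int) (offsets : List Int), Dom_solve_one L offsets → Pre_solve_one L offsets → Spec_solve_one L offsets (solve_one L offsets)

-- ===== LEMMAS AND PROOFS =====

-- B's per-candidate contribution, written as a function of the candidate n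
def contrib (L : Int) (a gap : List Int) (n : Int) : Int :=
  if 0 < n ∧ n < L then (if keyGapGood a gap (n * n) then n else 0) else 0

-- the conjunction of B's per-prime tests over a list of primes
def condAll (offsets : List Int) (P : List Int) (r : Int) : Bool :=
  P.all (fun p => condOne offsets p r)

theorem wheel_mod_val : WHEEL_MOD = 30030 := by decide

theorem wheel_mod_pos : 0 < WHEEL_MOD := by rw [wheel_mod_val]; omega

-- condOne only depends on r modulo p: shifting by a multiple of p does not change it
theorem condOne_shift (offsets : List Int) (q : Int) (hq : 0 < q) (k m r : Int)
    (hdvd : q ∣ m) : condOne offsets q (k * m + r) = condOne offsets q r := by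
  obtain ⟨t, rfl⟩ := hdvd
  have hsq : ((k * (q * t) + r) * (k * (q * t) + r)) % q = (r * r) % q := by
    have h1 : (k * (q * t) + r) % q = r % q := by
      have : k * (q * t) + r = r + k * t * q := by ring
      rw [this]
      simp only [Int.add_mul_emod_self_right]
    exact Int.ModEq.mul h1 h1
  have hin : PySem.Int.mod ((k * (q * t) + r) * (k * (q * t) + r)) q
      = PySem.Int.mod (r * r) q := by
    rw [PySem.Int.mod_eq_emod_of_pos hq, PySem.Int.mod_eq_emod_of_pos hq]
    exact hsq
  unfold condOne
  rw [hin]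

theorem condAll_shift (offsets : List Int) (P : List Int) (hP : ∀ q ∈ P, 0 < q)
    (k m r : Int) (hdvd : ∀ q ∈ P, q ∣ m) : condAll offsets P (k * m + r) = condAll offsets P r := by
  unfold condAll
  apply Bool.coe_iff_coe.mp
  simp only [List.all_eq_true]
  constructor <;> intro h q hq
  · rw [← condOne_shift offsets q (hP q hq) k m r (hdvd q hq)]; exact h q hq
  · rw [condOne_shift offsets q (hP q hq) k m r (hdvd q hq)]; exact h q hq

-- one lifted block equals the corresponding block of the full filtered range
theorem lift_block (offsets : List Int) (P : List Int) (hP : ∀ q ∈ P, 0 < q) (p : Int)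
    (m : Int) (hdvd : ∀ q ∈ P, q ∣ m) (k : Int) :
    ((((PySem.List.pyRange 0 m 1).filter (condAll offsets P)).filter
        (fun r => condOne offsets p (k * m + r))).map (fun r => k * m + r))
      = (PySem.List.pyRange (m * k) (m * k + m) 1).filter (condAll offsets (P ++ [p])) := by
  have hrange : PySem.List.pyRange (m * k) (m * k + m) 1
      = (PySem.List.pyRange 0 m 1).map (fun r => k * m + r) := by
    rw [PySem.List.pyRange_one, PySem.List.pyRange_one, List.map_map]
    have : m * k + m - m * k = m - 0 := by ring
    rw [this]
    apply List.map_congr_left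
    intro x _
    simp only [Function.comp]
    ring
  rw [hrange, List.filter_map]
  refine congrArg (List.map _) ?_
  rw [List.filter_filter]
  apply List.filter_congr
  intro r _
  simp only [Function.comp]
  have hsh := condAll_shift offsets P hP k m r hdvd
  unfold condAll at hsh ⊢
  rw [List.all_append, hsh]
  simp [Bool.and_comm]

-- one liftStep on the filtered state equals the filtered state for one more prime
theorem liftStep_eq (offsets : List Int) (P : List Int) (hP : ∀ q ∈ P, 0 < q) (p : Int)
    (hp : 0 < p) (m : Int) (hm : 0 < m) (hdvd : ∀ q ∈ P, q ∣ m) :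
    liftStep offsets ((PySem.List.pyRange 0 m 1).filter (condAll offsets P), m) p
      = ((PySem.List.pyRange 0 (m * p) 1).filter (condAll offsets (P ++ [p])), m * p) := by
  unfold liftStep
  simp only [Prod.mk.injEq]
  refine ⟨?_, trivial⟩
  -- induction over the Nat value of p
  have hgen : ∀ j : Nat,
      (PySem.List.pyRange 0 (j : Int) 1).flatMap (fun k =>
        (((PySem.List.pyRange 0 m 1).filter (condAll offsets P)).filter
            (fun r => condOne offsets p (k * m + r))).map (fun r => k * m + r))
      = (PySem.List.pyRange 0 (m * (j : Int)) 1).filter (condAll offsets (P ++ [p])) := by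
    intro j
    induction j with
    | zero => simp [PySem.List.pyRange_one_eq_nil]
    | succ i ih =>
      push_cast
      rw [PySem.List.pyRange_one_succ_right (by positivity), List.flatMap_append, ih]
      have h2 : m * ((i : Int) + 1) = m * i + m := by ring
      rw [h2, PySem.List.pyRange_one_append 0 (m * i) (m * i + m) (by positivity) (by omega),
          List.filter_append]
      congr 1
      rw [List.flatMap_cons, List.flatMap_nil, List.append_nil]
      exact lift_block offsets P hP p m hdvd i
  have hp' : (p.toNat : Int) = p := Int.toNat_of_nonneg (le_of_lt hp)
  have hfin := hgen p.toNat
  rwa [hp'] at hfin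

-- the whole fold over a list of primes equals the one-shot filter of the full range
theorem fold_lift (offsets : List Int) (Q : List Int) (hQ : ∀ q ∈ Q, 0 < q) :
    ∀ (P : List Int), (∀ q ∈ P, 0 < q) →
    Q.foldl (liftStep offsets) ((PySem.List.pyRange 0 P.prod 1).filter (condAll offsets P), P.prod)
      = ((PySem.List.pyRange 0 (P ++ Q).prod 1).filter (condAll offsets (P ++ Q)), (P ++ Q).prod) := by
  induction Q with
  | nil => intro P _; simp
  | cons p Q' ih =>
    intro P hP
    have hp : 0 < p := hQ p (by simp)
    have hm : 0 < P.prod := List.prod_pos hP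
    rw [List.foldl_cons,
        liftStep_eq offsets P hP p hp P.prod hm (fun q hq => List.dvd_prod hq)]
    have hprod : P.prod * p = (P ++ [p]).prod := by rw [List.prod_append]; simp
    have hPp : ∀ q ∈ P ++ [p], 0 < q := by
      intro q hq
      rcases List.mem_append.mp hq with h | h
      · exact hP q h
      · simp at h; omega
    rw [hprod, ih (fun q hq => hQ q (by simp [hq])) (P ++ [p]) hPp]
    simp

-- B's residue fold produces exactly A's admissible_residues, paired with WHEEL_MOD
theorem residues_eq (offsets : List Int) :
    WHEEL_PRIMES.foldl (liftStep offsets) ([0], 1)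
      = (admissible_residues offsets, WHEEL_MOD) := by
  have hinit : (([0], 1) : List Int × Int)
      = ((PySem.List.pyRange 0 (List.prod ([] : List Int)) 1).filter (condAll offsets []),
          List.prod ([] : List Int)) := by
    simp [condAll, PySem.List.pyRange]
  rw [hinit, fold_lift offsets WHEEL_PRIMES (by decide) [] (by simp)]
  simp only [List.nil_append]
  rfl

-- any element of a ≤-pairwise (sorted) list is ≤ its last element
theorem le_getLast_of_pairwise (l : List Int) (h : l.Pairwise (· ≤ ·)) (x : Int)
    (hx : x ∈ l) (hne : l ≠ []) : x ≤ l.getLast hne := by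
  induction l with
  | nil => simp at hx
  | cons y t ih =>
    rcases List.pairwise_cons.mp h with ⟨hy, ht⟩
    cases t with
    | nil => simp at hx; simp [hx, List.getLast]
    | cons z u =>
      rw [List.getLast_cons (by simp)]
      rcases List.mem_cons.mp hx with rfl | hx'
      · exact hy _ (List.getLast_mem (by simp))
      · exact ih ht hx' (by simp)

-- exchanging a double list sum
theorem sum_sum_comm (l1 l2 : List Int) (f : Int → Int → Int) :
    (l1.map (fun x => ((l2.map (fun y => f x y)).sum))).sum
      = (l2.map (fun y => ((l1.map (fun x => f x y)).sum))).sum := by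
  induction l1 with
  | nil => simp
  | cons x t ih =>
    simp only [List.map_cons, List.sum_cons, ih]
    rw [← PySem.List.sum_map_add_int]

-- pyRange with step WHEEL_MOD: nil and cons unfoldings
theorem pyRange_wheel_nil (a b : Int) (h : b ≤ a) : PySem.List.pyRange a b WHEEL_MOD = [] := by
  rw [PySem.List.pyRange_of_pos a b wheel_mod_pos, if_neg (by omega)]
  simp

theorem pyRange_wheel_cons (a b : Int) (h : a < b) :
    PySem.List.pyRange a b WHEEL_MOD = a :: PySem.List.pyRange (a + WHEEL_MOD) b WHEEL_MOD := by
  rw [PySem.List.pyRange_of_pos a b wheel_mod_pos,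
      PySem.List.pyRange_of_pos (a + WHEEL_MOD) b wheel_mod_pos, if_pos h]
  have hn : ((b - a + WHEEL_MOD - 1) / WHEEL_MOD).toNat
      = (if a + WHEEL_MOD < b then ((b - (a + WHEEL_MOD) + WHEEL_MOD - 1) / WHEEL_MOD).toNat
          else 0) + 1 := by
    rw [wheel_mod_val]; split_ifs <;> omega
  rw [hn, List.range_succ_eq_map]
  simp only [List.map_cons, List.map_map]
  refine List.cons_eq_cons.mpr ⟨by push_cast; ring, List.map_congr_left ?_⟩
  intro k _
  simp only [Function.comp]
  push_cast
  ring

-- B's merged verification pass equals A's two-phase pass on the sorted window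
theorem windowGood_eq_keyGapGood (a : List Int) (lo hi s : Int)
    (hmem : ∀ x ∈ a, lo ≤ x ∧ x ≤ hi) :
    windowGood lo hi (PySem.Set.ofList a) s
      = keyGapGood a ((PySem.List.pyRange lo (hi + 1) 1).filter
          (fun b => !((PySem.Set.ofList a).contains b))) s := by
  apply Bool.coe_iff_coe.mp
  have hc : ∀ b : Int, (PySem.Set.ofList a).contains b = true ↔ b ∈ a := by
    intro b
    simp [PySem.Set.contains]
  simp only [windowGood, keyGapGood, List.all_eq_true, Bool.and_eq_true, List.mem_filter,
    PySem.List.mem_pyRange_one, beq_iff_eq, Bool.not_eq_true']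
  constructor
  · intro h
    refine ⟨fun ai hai => ?_, fun b hb => ?_⟩
    · have := h ai ⟨(hmem ai hai).1, by have := (hmem ai hai).2; omega⟩
      rw [this, (hc ai).mpr hai]
    · rcases hb with ⟨hbr, hbc⟩
      have := h b hbr
      rw [this]
      simpa using hbc
  · rintro ⟨hkey, hgap⟩ b hbr
    by_cases hb : b ∈ a
    · rw [hkey b hb, (hc b).mpr hb]
    · have h1 : (PySem.Set.ofList a).contains b = false := by
        rw [← Bool.not_eq_true, hc]; exact hb
      rw [h1]
      exact hgap b ⟨hbr, h1⟩

-- B's block walk restricted to one residue class equals A's while-loop for that class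
theorem block_sum_eq_loopA (L : Int) (a gap : List Int) (r : Int) (hr0 : 0 ≤ r)
    (hrM : r < WHEEL_MOD) (b : Int) (hb : 0 ≤ b) :
    ((PySem.List.pyRange b L WHEEL_MOD).map (fun base => contrib L a gap (base + r))).sum
      = loopA L a gap (if b + r = 0 then WHEEL_MOD else b + r) := by
  have hMv := wheel_mod_val
  by_cases hbL : b < L
  · rw [pyRange_wheel_cons b L hbL, List.map_cons, List.sum_cons,
        block_sum_eq_loopA L a gap r hr0 hrM (b + WHEEL_MOD) (by omega),
        if_neg (by omega : ¬ b + WHEEL_MOD + r = 0)]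
    by_cases h0 : b + r = 0
    · rw [if_pos h0]
      have hb0 : b = 0 := by omega
      have hr0' : r = 0 := by omega
      rw [hb0, hr0']
      have hcz : contrib L a gap (0 + 0) = 0 := by
        simp only [contrib]
        rw [if_neg (by omega : ¬ ((0:Int) < 0 + 0 ∧ 0 + 0 < L))]
      rw [hcz]
      norm_num
    · rw [if_neg h0]
      conv_rhs => rw [loopA]
      by_cases hnL : b + r < L
      · rw [dif_pos hnL]
        have hcv : contrib L a gap (b + r)
            = if keyGapGood a gap ((b + r) * (b + r)) then b + r else 0 := by
          simp only [contrib]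
          rw [if_pos (by omega : (0:Int) < b + r ∧ b + r < L)]
        rw [hcv, show b + WHEEL_MOD + r = b + r + WHEEL_MOD by ring]
      · have hcz : contrib L a gap (b + r) = 0 := by
          simp only [contrib]
          rw [if_neg (by omega : ¬ ((0:Int) < b + r ∧ b + r < L))]
        rw [dif_neg hnL, hcz, loopA, dif_neg (by omega : ¬ b + WHEEL_MOD + r < L)]
        norm_num
  · rw [pyRange_wheel_nil b L (by omega)]
    simp only [List.map_nil, List.sum_nil]
    by_cases h0 : b + r = 0
    · rw [if_pos h0, loopA, dif_neg (by omega : ¬ WHEEL_MOD < L)]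
    · rw [if_neg h0, loopA, dif_neg (by omega : ¬ b + r < L)]
termination_by (L - b).toNat
decreasing_by rw [wheel_mod_val] at *; omega

theorem main_eq (L : Int) (offsets : List Int) (hne : offsets ≠ []) :
    solve_one L offsets = solve_one_alt L offsets := by
  have hsne : PySem.List.sorted offsets (fun x => x) false ≠ [] := fun h =>
    hne ((PySem.List.sorted_eq_nil_iff offsets (fun x => x) false).mp h)
  obtain ⟨a0, t, hs⟩ := List.exists_cons_of_ne_nil hsne
  have hp : (a0 :: t).Pairwise (· ≤ ·) := by
    rw [← hs]; exact PySem.List.sorted_pairwise offsets (fun x => x)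
  have hnil : (a0 :: t) ≠ [] := by simp
  have hlast : PySem.List.pyGetD (a0 :: t) (-1) 0 = (a0 :: t).getLast hnil :=
    PySem.List.pyGetD_neg_one _ _ _
  have hmem : ∀ x ∈ (a0 :: t), a0 ≤ x ∧ x ≤ (a0 :: t).getLast hnil := by
    intro x hx
    constructor
    · rcases List.mem_cons.mp hx with rfl | hx'
      · exact le_refl x
      · exact (List.pairwise_cons.mp hp).1 x hx'
    · exact le_getLast_of_pairwise _ hp x hx hnil
  unfold solve_one solve_one_alt
  rw [hs]
  simp only []
  rw [hlast, residues_eq (a0 :: t)]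
  -- names for the pieces
  set gl := (a0 :: t).getLast hnil with hgl
  set gap := (PySem.List.pyRange a0 (gl + 1) 1).filter
      (fun b => !((PySem.Set.ofList (a0 :: t)).contains b)) with hgap
  set residues := admissible_residues (a0 :: t) with hres
  -- A's side: a sum over residues
  rw [PySem.List.foldl_add residues
        (fun r => loopA L (a0 :: t) gap (if r == 0 then r + WHEEL_MOD else r)) 0]
  -- B's side: inner loops become sums of contributions
  have hwin : ∀ s : Int, windowGood a0 gl (PySem.Set.ofList (a0 :: t)) s
      = keyGapGood (a0 :: t) gap s := fun s =>
    windowGood_eq_keyGapGood (a0 :: t) a0 gl s hmem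
  have hinner : ∀ (base tot : Int),
      residues.foldl
        (fun total r =>
          let n := base + r
          if decide (0 < n) && decide (n < L) then
            (if windowGood a0 gl (PySem.Set.ofList (a0 :: t)) (n * n) then total + n else total)
          else total) tot
      = tot + (residues.map (fun r => contrib L (a0 :: t) gap (base + r))).sum := by
    intro base tot
    have hfun : (fun (total r : Int) =>
          let n := base + r
          if decide (0 < n) && decide (n < L) then
            (if windowGood a0 gl (PySem.Set.ofList (a0 :: t)) (n * n) then total + n else total)
          else total)
        = fun total r => total + contrib L (a0 :: t) gap (base + r) := by
      funext total r
      simp only [contrib, ← hwin, Bool.and_eq_true, decide_eq_true_eq]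
      split_ifs <;> omega
    rw [hfun, PySem.List.foldl_add]
  have houter : (fun (total base : Int) =>
        residues.foldl
          (fun total r =>
            let n := base + r
            if decide (0 < n) && decide (n < L) then
              (if windowGood a0 gl (PySem.Set.ofList (a0 :: t)) (n * n) then total + n else total)
            else total) total)
      = fun total base =>
          total + (residues.map (fun r => contrib L (a0 :: t) gap (base + r))).sum := by
    funext total base
    exact hinner base total
  rw [houter, PySem.List.foldl_add]
  -- exchange the two sums and identify each residue class with A's while-loop
  rw [sum_sum_comm (PySem.List.pyRange 0 L WHEEL_MOD) residues
        (fun base r => contrib L (a0 :: t) gap (base + r))]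
  rw [zero_add, zero_add]
  refine congrArg List.sum ?_
  apply List.map_congr_left
  intro r hrmem
  have hr : 0 ≤ r ∧ r < WHEEL_MOD := by
    rw [hres] at hrmem
    unfold admissible_residues at hrmem
    have h1 := (List.mem_filter.mp hrmem).1
    rwa [PySem.List.mem_pyRange_one] at h1
  have hb := block_sum_eq_loopA L (a0 :: t) gap r hr.1 hr.2 0 (le_refl 0)
  have harg : (if (r == 0) = true then r + WHEEL_MOD else r)
      = (if (0 : Int) + r = 0 then WHEEL_MOD else 0 + r) := by
    simp only [beq_iff_eq, zero_add]
    split_ifs <;> omega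
  rw [harg, ← hb]

-- ===== VERDICT (by name: the statement is the Claim_ definition above) =====
theorem solve_one_spec : Claim_equal_solve_one := by
  intro L offsets _ hpre
  unfold Spec_solve_one
  exact main_eq L offsets hpre
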